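-- pv_equiv track=rewrite | github.com/pypi-data/pypi-mirror-333 | packages/cuequivariance-ops-torch-cu12/cuequivariance_ops_torch_cu12-0.3.0-cp312-cp312-manylinux_2_38_aarch64.whl/cuequivariance_ops_torch/symmetric_tensor_contraction.py | _diff_index_tuple_list_tensor_a
-- ===== SOURCE A (Python) =====
-- def _diff_index_tuple_list_tensor_a(path_vals, path_indices, num_in_segments):
--     new_path_vals, new_path_indices = [], []
--
--     for path_val, path_index in zip(path_vals, path_indices):
--         for i_segment in range(0, num_in_segments):
--             tmp = path_index[1:-1]
--             num = tmp.count(i_segment)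
--
--             if num == 0:
--                 continue
--
--             tmp.pop(tmp.index(i_segment))
--             new_path_index = [i_segment] + [path_index[0]] + tmp + [path_index[-1]]
--             new_path_val = num * path_val
--
--             new_path_vals.append(new_path_val)
--             new_path_indices.append(new_path_index)
--
--     return new_path_vals, new_path_indices
-- ===== SOURCE B (Python) =====
-- def _diff_index_tuple_list_tensor_a(path_vals, path_indices, num_in_segments):
--     new_path_vals, new_path_indices = [], []
--     for path_val, path_index in zip(path_vals, path_indices):
--         inner = path_index[1:-1]
--         counts = {}
--         for x in inner:
--             counts[x] = counts.get(x, 0) + 1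
--         for seg in sorted(k for k in counts if 0 <= k < num_in_segments):
--             pos = inner.index(seg)
--             rest = inner[:pos] + inner[pos + 1:]
--             new_path_vals.append(counts[seg] * path_val)
--             new_path_indices.append([seg, path_index[0]] + rest + [path_index[-1]])
--     return new_path_vals, new_path_indices
-- ===== Notes on version B (the rewrite author's own statement) =====
-- stated objective: faster
-- what changed: Instead of scanning all num_in_segments values and recounting the inner slice for each, B builds one occurrence counter of the inner slice per path and iterates only the sorted distinct in-range segments, splicing out the first occurrence with slices.
import Mathlib
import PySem

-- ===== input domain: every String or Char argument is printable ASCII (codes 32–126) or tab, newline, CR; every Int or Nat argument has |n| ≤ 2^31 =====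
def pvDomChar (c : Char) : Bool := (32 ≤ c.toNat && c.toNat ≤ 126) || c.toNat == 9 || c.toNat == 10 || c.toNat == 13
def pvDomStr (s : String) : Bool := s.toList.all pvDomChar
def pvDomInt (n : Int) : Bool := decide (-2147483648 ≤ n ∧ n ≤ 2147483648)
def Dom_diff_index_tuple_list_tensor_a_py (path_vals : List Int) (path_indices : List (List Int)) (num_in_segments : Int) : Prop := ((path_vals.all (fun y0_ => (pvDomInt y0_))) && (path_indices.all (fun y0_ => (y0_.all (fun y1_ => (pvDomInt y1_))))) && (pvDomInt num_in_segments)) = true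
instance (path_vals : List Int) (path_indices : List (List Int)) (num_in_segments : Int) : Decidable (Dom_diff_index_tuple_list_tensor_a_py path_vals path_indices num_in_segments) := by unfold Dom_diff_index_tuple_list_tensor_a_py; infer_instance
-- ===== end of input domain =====

-- B replaces the scan over every segment id (recounting the inner slice each time) by one
-- occurrence counter per path and a loop over the sorted distinct in-range segments (objective: faster).

-- ===== PORT A =====
-- path_index[0] / path_index[-1] are only evaluated under num ≠ 0, which forces the list nonempty,
-- so pyGetD's default is never used (the Python never raises there).
def diff_index_tuple_list_tensor_a_py (path_vals : List Int) (path_indices : List (List Int)) (num_in_segments : Int) : List Int × List (List Int) :=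
  (path_vals.zip path_indices).foldl (fun acc pq =>
    (PySem.List.pyRange 0 num_in_segments 1).foldl (fun acc2 i =>
      let tmp := PySem.List.slice pq.2 (some 1) (some (-1))
      let num := PySem.List.count tmp i
      if num == 0 then acc2
      else
        -- tmp.pop(tmp.index(i_segment)): index? and pop? are some here because num ≠ 0
        let tmp2 := ((PySem.List.index? tmp i).bind (fun j => (PySem.List.pop? tmp (j : Int)).map (·.2))).getD tmp
        (acc2.1 ++ [(num : Int) * pq.1],
         acc2.2 ++ [[i] ++ [PySem.List.pyGetD pq.2 0 0] ++ tmp2 ++ [PySem.List.pyGetD pq.2 (-1) 0]]))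
      acc) ([], [])

-- ===== PORT B =====
-- idx[0] / idx[-1] only reached when the counter is nonempty, hence idx nonempty: default unused.
def diff_index_tuple_list_tensor_a_py_alt (path_vals : List Int) (path_indices : List (List Int)) (num_in_segments : Int) : List Int × List (List Int) :=
  (path_vals.zip path_indices).foldl (fun acc pq =>
    let inner := PySem.List.slice pq.2 (some 1) (some (-1))
    let counts := inner.foldl (fun d x => d.insert x (d.getD x 0 + 1)) (PySem.Dict.empty : PySem.Dict Int Int)
    let segs := PySem.List.sorted ((PySem.Dict.keys counts).filter (fun k => decide (0 ≤ k) && decide (k < num_in_segments))) id false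
    segs.foldl (fun acc2 seg =>
      let pos : Int := ((PySem.List.index? inner seg).getD 0 : Nat)
      let rest := PySem.List.slice inner none (some pos) ++ PySem.List.slice inner (some (pos + 1)) none
      (acc2.1 ++ [counts.getD seg 0 * pq.1],
       acc2.2 ++ [[seg] ++ [PySem.List.pyGetD pq.2 0 0] ++ rest ++ [PySem.List.pyGetD pq.2 (-1) 0]]))
      acc) ([], [])

-- ===== PRECONDITION & SPEC =====
def Spec_diff_index_tuple_list_tensor_a_py (path_vals : List Int) (path_indices : List (List Int)) (num_in_segments : Int) (out : List Int × List (List Int)) : Prop := out = diff_index_tuple_list_tensor_a_py_alt path_vals path_indices num_in_segments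
instance (path_vals : List Int) (path_indices : List (List Int)) (num_in_segments : Int) (out : List Int × List (List Int)) : Decidable (Spec_diff_index_tuple_list_tensor_a_py path_vals path_indices num_in_segments out) := by unfold Spec_diff_index_tuple_list_tensor_a_py; infer_instance

-- ===== CLAIM (what is proved, stated in full; the proofs are below) =====
def Claim_equal_diff_index_tuple_list_tensor_a_py : Prop := ∀ (path_vals : List Int) (path_indices : List (List Int)) (num_in_segments : Int), Dom_diff_index_tuple_list_tensor_a_py path_vals path_indices num_in_segments → Spec_diff_index_tuple_list_tensor_a_py path_vals path_indices num_in_segments (diff_index_tuple_list_tensor_a_py path_vals path_indices num_in_segments)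

-- ===== LEMMAS AND PROOFS =====

-- a loop that either skips or appends one element to each component of a pair accumulator
theorem pvFoldlPairSkip (l : List Int) (p : Int → Bool) (g1 : Int → Int) (g2 : Int → List Int)
    (acc : List Int × List (List Int)) :
    l.foldl (fun a i => if p i then a else (a.1 ++ [g1 i], a.2 ++ [g2 i])) acc
      = (acc.1 ++ (l.filter (fun i => !p i)).map g1, acc.2 ++ (l.filter (fun i => !p i)).map g2) := by
  induction l generalizing acc with
  | nil => simp
  | cons x xs ih => by_cases h : p x <;> simp [h, ih]

-- a loop that appends one element to each component of a pair accumulator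
theorem pvFoldlPairApp (l : List Int) (g1 : Int → Int) (g2 : Int → List Int)
    (acc : List Int × List (List Int)) :
    l.foldl (fun a i => (a.1 ++ [g1 i], a.2 ++ [g2 i])) acc
      = (acc.1 ++ l.map g1, acc.2 ++ l.map g2) := by
  induction l generalizing acc with
  | nil => simp
  | cons x xs ih => simp [ih]

-- B's sorted distinct in-range segments ARE A's filtered range, in the same (ascending) order
theorem pvSegsEq (inner : List Int) (n : Int) :
    PySem.List.sorted ((PySem.Dict.keys (PySem.Dict.counter inner)).filter
        (fun k => decide (0 ≤ k) && decide (k < n))) id false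
      = (PySem.List.pyRange 0 n 1).filter (fun i => !(PySem.List.count inner i == 0)) := by
  apply PySem.List.sorted_eq_of_perm_of_pairwise_lt
  · rw [List.perm_ext_iff_of_nodup
      ((PySem.List.nodup_pyRange_one 0 n).filter _)
      ((PySem.Dict.nodup_keys_counter inner).filter _)]
    intro a
    simp only [List.mem_filter, PySem.List.mem_pyRange_one, PySem.Dict.keys_counter,
      PySem.Set.mem_ofList, PySem.List.count, List.count_eq_zero, Bool.not_eq_eq_eq_not,
      Bool.not_true, beq_eq_false_iff_ne, ne_eq, decide_eq_true_eq, Bool.and_eq_true]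
    tauto
  · exact (PySem.List.pairwise_lt_pyRange_one 0 n).filter _

-- the first occurrence of v removed: pop-at-index equals take ++ drop of the slices
theorem pvEraseEq (inner : List Int) (v : Int) (hv : v ∈ inner) :
    ((PySem.List.index? inner v).bind (fun j => (PySem.List.pop? inner (j : Int)).map (·.2))).getD inner
      = PySem.List.slice inner none (some (((PySem.List.index? inner v).getD 0 : Nat) : Int))
        ++ PySem.List.slice inner (some ((((PySem.List.index? inner v).getD 0 : Nat) : Int) + 1)) none := by
  obtain ⟨j, hj⟩ := Option.isSome_iff_exists.mp ((PySem.List.index?_isSome_iff inner v).mpr hv)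
  obtain ⟨hjlt, -, -⟩ := PySem.List.getElem_of_index?_eq_some hj
  have h1 : ((j : Int) + 1) = (((j + 1 : Nat)) : Int) := by push_cast; ring
  rw [hj]
  simp only [Option.bind_some, Option.getD_some]
  rw [PySem.List.pop?_natCast inner j hjlt]
  simp only [Option.map_some, Option.getD_some]
  rw [PySem.List.slice_to_natCast, h1, PySem.List.slice_from_natCast,
    List.eraseIdx_eq_take_drop_succ]

-- one path's inner loop: A's scan over all segments equals B's loop over the counter's sorted keys
theorem pvStepEq (n : Int) (acc : List Int × List (List Int)) (pq : Int × List Int) :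
    (PySem.List.pyRange 0 n 1).foldl (fun acc2 i =>
      let tmp := PySem.List.slice pq.2 (some 1) (some (-1))
      let num := PySem.List.count tmp i
      if num == 0 then acc2
      else
        let tmp2 := ((PySem.List.index? tmp i).bind (fun j => (PySem.List.pop? tmp (j : Int)).map (·.2))).getD tmp
        (acc2.1 ++ [(num : Int) * pq.1],
         acc2.2 ++ [[i] ++ [PySem.List.pyGetD pq.2 0 0] ++ tmp2 ++ [PySem.List.pyGetD pq.2 (-1) 0]])) acc
    =
    (let inner := PySem.List.slice pq.2 (some 1) (some (-1))
     let counts := inner.foldl (fun d x => d.insert x (d.getD x 0 + 1)) (PySem.Dict.empty : PySem.Dict Int Int)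
     let segs := PySem.List.sorted ((PySem.Dict.keys counts).filter (fun k => decide (0 ≤ k) && decide (k < n))) id false
     segs.foldl (fun acc2 seg =>
       let pos : Int := ((PySem.List.index? inner seg).getD 0 : Nat)
       let rest := PySem.List.slice inner none (some pos) ++ PySem.List.slice inner (some (pos + 1)) none
       (acc2.1 ++ [counts.getD seg 0 * pq.1],
        acc2.2 ++ [[seg] ++ [PySem.List.pyGetD pq.2 0 0] ++ rest ++ [PySem.List.pyGetD pq.2 (-1) 0]])) acc) := by
  set inner := PySem.List.slice pq.2 (some 1) (some (-1)) with hinner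
  have hcnt : inner.foldl (fun d x => d.insert x (d.getD x 0 + 1)) (PySem.Dict.empty : PySem.Dict Int Int)
      = PySem.Dict.counter inner := PySem.Dict.foldl_insert_getD_add_one_eq_counter inner
  simp only [hcnt]
  rw [pvFoldlPairSkip _ (fun i => PySem.List.count inner i == 0), pvFoldlPairApp, pvSegsEq]
  have hmem : ∀ i ∈ (PySem.List.pyRange 0 n 1).filter (fun i => !(PySem.List.count inner i == 0)),
      i ∈ inner := by
    intro i hi
    have := (List.mem_filter.mp hi).2
    simpa [PySem.List.count, List.count_eq_zero] using this
  simp only [Prod.mk.injEq]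
  refine ⟨?_, ?_⟩
  · apply congrArg
    apply List.map_congr_left
    intro i hi
    rw [PySem.Dict.getD_counter]
    simp [PySem.List.count]
  · apply congrArg
    apply List.map_congr_left
    intro i hi
    rw [pvEraseEq inner i (hmem i hi)]

-- ===== VERDICT (by name: the statement is the Claim_ definition above) =====
theorem diff_index_tuple_list_tensor_a_py_spec : Claim_equal_diff_index_tuple_list_tensor_a_py := by
  intro path_vals path_indices num_in_segments _
  unfold Spec_diff_index_tuple_list_tensor_a_py
  unfold diff_index_tuple_list_tensor_a_py diff_index_tuple_list_tensor_a_py_alt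
  congr 1
  funext acc pq
  exact pvStepEq num_in_segments acc pq
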